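-- pv_equiv track=rewrite | github.com/zvodd/aoc2024 | day5_p2.py | parse
-- ===== SOURCE A (Python) =====
-- def parse(lines):
--     rules = []
--     seqs = []
--     state = 0
--     for i,line in enumerate(lines):
--         if line.lstrip().startswith("#"):
--             continue
--         if line == "":
--             state += 1
--             continue
--         if state == 0:
--             x,y = line.split("|")
--             rules.append((int(x), int(y)))
--         elif state == 1:
--             seqs.append([int(x) for x in line.split(',')])
--     return (rules, seqs)
-- ===== SOURCE B (Python) =====
-- def parse(lines):
--     content = [l for l in lines if not l.lstrip().startswith("#")]
--     groups = []
--     cur = []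
--     for l in content:
--         if l == "":
--             groups.append(cur)
--             cur = []
--         else:
--             cur.append(l)
--     groups.append(cur)
--     rules = []
--     for l in groups[0]:
--         x, y = l.split("|")
--         rules.append((int(x), int(y)))
--     seqs = [[int(v) for v in l.split(",")] for l in groups[1]] if len(groups) > 1 else []
--     return (rules, seqs)
-- ===== Notes on version B (the rewrite author's own statement) =====
-- stated objective: simpler
-- what changed: Replaces A's single loop with a blank-line state counter by a decomposition: filter out comment lines, split the remainder into blank-separated groups, then parse group 0 as rules and group 1 (if present) as sequences.
import Mathlib
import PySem

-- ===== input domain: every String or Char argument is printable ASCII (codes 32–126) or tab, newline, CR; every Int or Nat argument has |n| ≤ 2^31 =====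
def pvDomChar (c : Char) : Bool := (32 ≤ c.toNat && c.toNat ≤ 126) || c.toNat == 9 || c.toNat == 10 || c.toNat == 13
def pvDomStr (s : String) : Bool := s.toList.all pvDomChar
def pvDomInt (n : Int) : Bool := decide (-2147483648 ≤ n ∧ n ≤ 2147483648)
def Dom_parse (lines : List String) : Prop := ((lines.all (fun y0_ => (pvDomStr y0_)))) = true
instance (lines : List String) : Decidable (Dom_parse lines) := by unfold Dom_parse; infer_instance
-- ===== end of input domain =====

-- B replaces A's stateful counter loop by a filter-comments / split-into-blank-separated-groups /
-- parse-group-0-and-group-1 decomposition (objective: simpler); return values proved equal.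

-- line.lstrip().startswith("#"), the shape test shared by both versions
def pvNotComment (l : String) : Bool := !(PySem.Str.startswith (PySem.Str.lstrip l) "#")

-- ===== PORT A =====
-- A's single loop over the lines carrying (rules, seqs, state); state counts blank lines seen.
-- line.split(sep) with sep ≠ "" is PySem.Str.split? …, always `some`; `.getD []` is exact.
def parseLoop : List String → List (Int × Int) → List (List Int) → Nat → (List (Int × Int)) × List (List Int)
  | [], rules, seqs, _ => (rules, seqs)
  | line :: rest, rules, seqs, state =>
    if pvNotComment line = false then
      parseLoop rest rules seqs state
    else if line = "" then
      parseLoop rest rules seqs (state + 1)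
    else if state = 0 then
      -- x,y = line.split("|"); Python raises unless exactly 2 int()-parsable parts (outside Pre_)
      parseLoop rest
        (rules ++ [(match (PySem.Str.split? line "|").getD [] with
                    | [x, y] => ((PySem.Int.ofStr? x).getD 0, (PySem.Int.ofStr? y).getD 0)
                    | _ => ((0 : Int), (0 : Int)))]) seqs state
    else if state = 1 then
      parseLoop rest rules
        (seqs ++ [((PySem.Str.split? line ",").getD []).map (fun x => (PySem.Int.ofStr? x).getD 0)]) state
    else
      parseLoop rest rules seqs state

def parse (lines : List String) : (List (Int × Int)) × List (List Int) :=
  parseLoop lines [] [] 0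

-- ===== PORT B =====
-- x,y = l.split("|"); (int(x), int(y)). Python raises unless exactly 2 int()-parsable parts (outside Pre_)
def parseRuleLine (l : String) : Int × Int :=
  match (PySem.Str.split? l "|").getD [] with
  | [x, y] => ((PySem.Int.ofStr? x).getD 0, (PySem.Int.ofStr? y).getD 0)
  | _ => ((0 : Int), (0 : Int))

def parseSeqLine (l : String) : List Int :=
  ((PySem.Str.split? l ",").getD []).map (fun x => (PySem.Int.ofStr? x).getD 0)

-- the (groups, cur) loop body of Source B
def groupStep : (List (List String) × List String) → String → (List (List String) × List String)
  | (groups, cur), l => if l = "" then (groups ++ [cur], []) else (groups, cur ++ [l])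

def parse_alt (lines : List String) : (List (Int × Int)) × List (List Int) :=
  let content := lines.filter pvNotComment
  let p := content.foldl groupStep ([], [])
  let groups := p.1 ++ [p.2]
  let rules := (groups.headD []).map parseRuleLine
  let seqs := if groups.length > 1 then ((groups.drop 1).headD []).map parseSeqLine else []
  (rules, seqs)

-- ===== PRECONDITION & SPEC =====
-- shape tests used only by Pre_
def pvIsRuleLine (l : String) : Bool :=
  match (PySem.Str.split? l "|").getD [] with
  | [x, y] => (PySem.Int.ofStr? x).isSome && (PySem.Int.ofStr? y).isSome
  | _ => false

def pvIsSeqLine (l : String) : Bool :=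
  ((PySem.Str.split? l ",").getD []).all (fun x => (PySem.Int.ofStr? x).isSome)

-- Pre_ = exactly the inputs where Python A returns: every non-comment line before the first blank
-- (among non-comment lines) splits on "|" into exactly two int()-parsable parts, and every
-- non-comment line between the first and second blank is a comma-list of int()-parsable parts;
-- elsewhere Python A raises ValueError. Lines after the second blank are ignored, hence unconstrained.
def Pre_parse (lines : List String) : Prop :=
  (∀ l ∈ (lines.filter pvNotComment).takeWhile (· ≠ ""), pvIsRuleLine l = true) ∧
  (∀ l ∈ (((lines.filter pvNotComment).dropWhile (· ≠ "")).drop 1).takeWhile (· ≠ ""),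
      pvIsSeqLine l = true)
instance (lines : List String) : Decidable (Pre_parse lines) := by unfold Pre_parse; infer_instance

def pvWitness_parse : List String := ["47|53", "# comment", "97|13", "", "75,47,61", "1,2"]

def Spec_parse (lines : List String) (out : (List (Int × Int)) × List (List Int)) : Prop := out = parse_alt lines
instance (lines : List String) (out : (List (Int × Int)) × List (List Int)) : Decidable (Spec_parse lines out) := by unfold Spec_parse; infer_instance

-- ===== CLAIM (what is proved, stated in full; the proofs are below) =====
def Claim_equal_parse : Prop := ∀ (lines : List String), Dom_parse lines → Pre_parse lines → Spec_parse lines (parse lines)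

-- ===== LEMMAS AND PROOFS =====

-- recursive characterization of Source B's blank-separated grouping
def fgRec : List String → List (List String)
  | [] => [[]]
  | l :: rest =>
    if l = "" then [] :: fgRec rest
    else
      match fgRec rest with
      | [] => [[l]]
      | g :: gs => (l :: g) :: gs

def prependCur (cur : List String) : List (List String) → List (List String)
  | [] => [cur]
  | g :: gs => (cur ++ g) :: gs

lemma fgRec_ne_nil (c : List String) : fgRec c ≠ [] := by
  cases c with
  | nil => simp [fgRec]
  | cons l rest =>
    simp only [fgRec]
    split_ifs
    · simp
    · cases fgRec rest <;> simp

lemma groupStep_blank (gs : List (List String)) (cur : List String) :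
    groupStep (gs, cur) "" = (gs ++ [cur], []) := by simp [groupStep]

lemma groupStep_other (gs : List (List String)) (cur : List String) (l : String) (h : l ≠ "") :
    groupStep (gs, cur) l = (gs, cur ++ [l]) := by simp [groupStep, h]

lemma fgRec_blank (rest : List String) : fgRec ("" :: rest) = [] :: fgRec rest := by
  simp [fgRec]

lemma fgRec_other (l : String) (rest : List String) (h : l ≠ "") :
    fgRec (l :: rest) = (match fgRec rest with | [] => [[l]] | g :: gs => (l :: g) :: gs) := by
  simp [fgRec, h]

lemma foldl_groupStep (content : List String) :
    ∀ (gs : List (List String)) (cur : List String),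
      (content.foldl groupStep (gs, cur)).1 ++ [(content.foldl groupStep (gs, cur)).2]
        = gs ++ prependCur cur (fgRec content) := by
  induction content with
  | nil => intro gs cur; simp [fgRec, prependCur]
  | cons l rest ih =>
    intro gs cur
    by_cases h : l = ""
    · subst h
      rw [List.foldl_cons, groupStep_blank, ih (gs ++ [cur]) [], fgRec_blank]
      rcases hf : fgRec rest with _ | ⟨g, gs'⟩
      · exact absurd hf (fgRec_ne_nil rest)
      · simp [prependCur]
    · rw [List.foldl_cons, groupStep_other _ _ _ h, ih gs (cur ++ [l]), fgRec_other _ _ h]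
      rcases hf : fgRec rest with _ | ⟨g, gs'⟩
      · exact absurd hf (fgRec_ne_nil rest)
      · simp [prependCur]

lemma loop_ge2 (lines : List String) : ∀ (r : List (Int × Int)) (s : List (List Int)) (st : Nat),
    2 ≤ st → parseLoop lines r s st = (r, s) := by
  induction lines with
  | nil => intro r s st _; rfl
  | cons l rest ih =>
    intro r s st hst
    simp only [parseLoop]
    split_ifs with h1 h2 h3 h4
    · exact ih r s st hst
    · exact ih r s (st + 1) (by omega)
    · omega
    · omega
    · exact ih r s st hst

lemma loop_one (lines : List String) : ∀ (r : List (Int × Int)) (s : List (List Int)),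
    parseLoop lines r s 1
      = (r, s ++ ((fgRec (lines.filter pvNotComment)).headD []).map parseSeqLine) := by
  induction lines with
  | nil => intro r s; simp [parseLoop, fgRec]
  | cons l rest ih =>
    intro r s
    have hfl : (l :: rest).filter pvNotComment
        = if pvNotComment l then l :: rest.filter pvNotComment else rest.filter pvNotComment :=
      List.filter_cons
    simp only [parseLoop]
    split_ifs with h1 h2 h3
    · have hf : pvNotComment l = false := h1
      rw [ih, hfl, if_neg (by simp [hf])]
    · have hf : pvNotComment l = true := by simpa using h1
      subst h2
      rw [loop_ge2 rest r s 2 (by omega), hfl, if_pos (by simp [hf])]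
      simp [fgRec_blank]
    · exact h3.elim
    · have hf : pvNotComment l = true := by simpa using h1
      rw [ih, hfl, if_pos (by simp [hf]), fgRec_other _ _ h2]
      rcases hfr : fgRec (rest.filter pvNotComment) with _ | ⟨g, gs'⟩
      · exact absurd hfr (fgRec_ne_nil _)
      · simp [parseSeqLine]

lemma loop_zero (lines : List String) : ∀ (r : List (Int × Int)) (s : List (List Int)),
    parseLoop lines r s 0
      = (r ++ ((fgRec (lines.filter pvNotComment)).headD []).map parseRuleLine,
         s ++ ((fgRec (lines.filter pvNotComment)).tail.headD []).map parseSeqLine) := by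
  induction lines with
  | nil => intro r s; simp [parseLoop, fgRec]
  | cons l rest ih =>
    intro r s
    have hfl : (l :: rest).filter pvNotComment
        = if pvNotComment l then l :: rest.filter pvNotComment else rest.filter pvNotComment :=
      List.filter_cons
    simp only [parseLoop]
    split_ifs with h1 h2
    · have hf : pvNotComment l = false := h1
      rw [ih, hfl, if_neg (by simp [hf])]
    · have hf : pvNotComment l = true := by simpa using h1
      subst h2
      rw [loop_one, hfl, if_pos (by simp [hf])]
      simp [fgRec_blank]
    · have hf : pvNotComment l = true := by simpa using h1
      rw [ih, hfl, if_pos (by simp [hf]), fgRec_other _ _ h2]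
      rcases hfr : fgRec (rest.filter pvNotComment) with _ | ⟨g, gs'⟩
      · exact absurd hfr (fgRec_ne_nil _)
      · simp [parseRuleLine]

lemma parse_eq_alt (lines : List String) : parse lines = parse_alt lines := by
  rw [parse, loop_zero]
  unfold parse_alt
  have hfull := foldl_groupStep (lines.filter pvNotComment) [] []
  rcases hfr : fgRec (lines.filter pvNotComment) with _ | ⟨g, gs'⟩
  · exact absurd hfr (fgRec_ne_nil _)
  · rw [hfr] at hfull
    simp only [prependCur, List.nil_append] at hfull
    simp only [hfull]
    rcases gs' with _ | ⟨g1, grest⟩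
    · simp
    · simp

-- ===== VERDICT (by name: the statement is the Claim_ definition above) =====
theorem parse_spec : Claim_equal_parse := by
  intro lines _ _
  unfold Spec_parse
  exact parse_eq_alt lines
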